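-- pv_equiv track=rewrite | github.com/ianwu13/RL4LMs | offline_rl/dummy_train.py | get_rtgs
-- ===== SOURCE A (Python) =====
-- def count_prev_as(lst):
--     cnt = 0
--     for item in lst:
--         if item == 'a':
--             cnt += 1
--     return cnt
--
-- def get_rtgs(traj):
--
--     rewards = []
--     for i in range(len(traj)):
--         score = 0
--         if traj[i] != 'done':
--             score += -2
--         if traj[i] == 'a':
--             prev_as = count_prev_as(traj[:i])
--             if prev_as < 5:
--                 score += 10
--
--         rewards.append(score)
--
--     rtgs = []
--     for i in range(len(rewards)):
--         rtgs.append(sum(rewards[i:]))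
--
--     return rtgs
-- ===== SOURCE B (Python) =====
-- def get_rtgs(traj):
--     rewards = []
--     a_cnt = 0
--     for t in traj:
--         score = (-2 if t != 'done' else 0) + (10 if t == 'a' and a_cnt < 5 else 0)
--         if t == 'a':
--             a_cnt += 1
--         rewards.append(score)
--     rtgs = []
--     acc = 0
--     for r in reversed(rewards):
--         acc += r
--         rtgs.append(acc)
--     rtgs.reverse()
--     return rtgs
-- ===== Notes on version B (the rewrite author's own statement) =====
-- stated objective: faster
-- what changed: B replaces A's O(n^2) rescans (count_prev_as over the prefix for every 'a', and sum over every suffix) by a single forward pass keeping a running count of 'a's and a single backward pass accumulating the reward-to-go.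
import Mathlib
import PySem

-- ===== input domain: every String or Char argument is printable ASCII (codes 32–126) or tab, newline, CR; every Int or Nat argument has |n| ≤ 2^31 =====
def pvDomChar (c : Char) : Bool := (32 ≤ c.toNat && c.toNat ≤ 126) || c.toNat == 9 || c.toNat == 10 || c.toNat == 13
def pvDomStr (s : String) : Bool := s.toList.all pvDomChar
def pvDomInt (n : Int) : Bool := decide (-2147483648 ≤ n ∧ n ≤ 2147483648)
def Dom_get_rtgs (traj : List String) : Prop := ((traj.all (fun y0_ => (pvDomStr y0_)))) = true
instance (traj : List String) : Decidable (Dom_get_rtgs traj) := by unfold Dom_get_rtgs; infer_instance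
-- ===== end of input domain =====

-- B replaces A's quadratic prefix/suffix rescans by one forward pass (running 'a' count)
-- and one backward pass (running reward-to-go sum); objective: faster (asymptotic).


-- ===== PORT A =====
def count_prev_as (lst : List String) : Int :=
  lst.foldl (fun cnt item => if item = "a" then cnt + 1 else cnt) 0

def get_rtgs (traj : List String) : List Int :=
  let rewards := (List.range traj.length).foldl (fun rewards i =>
    let t := traj.getD i ""          -- traj[i]; i drawn from range(len(traj)), always in range
    let score : Int := 0
    let score := if t ≠ "done" then score + (-2) else score
    let score := if t = "a" then
        (if count_prev_as (traj.take i) < 5 then score + 10 else score)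
      else score
    rewards ++ [score]) []
  (List.range rewards.length).foldl (fun rtgs i =>
    rtgs ++ [(rewards.drop i).foldl (· + ·) 0]) []   -- sum(rewards[i:])

-- ===== PORT B =====
def get_rtgs_alt (traj : List String) : List Int :=
  let p := traj.foldl (fun (p : List Int × Int) t =>
    let score : Int := (if t ≠ "done" then -2 else 0) + (if t = "a" ∧ p.2 < 5 then 10 else 0)
    (p.1 ++ [score], if t = "a" then p.2 + 1 else p.2)) ([], 0)
  let q := p.1.reverse.foldl (fun (q : Int × List Int) r =>
    (q.1 + r, q.2 ++ [q.1 + r])) (0, [])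
  q.2.reverse

-- ===== PRECONDITION & SPEC =====
def Spec_get_rtgs (traj : List String) (out : List Int) : Prop := out = get_rtgs_alt traj
instance (traj : List String) (out : List Int) : Decidable (Spec_get_rtgs traj out) := by unfold Spec_get_rtgs; infer_instance

-- ===== CLAIM (what is proved, stated in full; the proofs are below) =====
def Claim_equal_get_rtgs : Prop := ∀ (traj : List String), Dom_get_rtgs traj → Spec_get_rtgs traj (get_rtgs traj)

-- ===== LEMMAS AND PROOFS =====

/-- per-step score, as a function of the item and the number of previous 'a's -/
def scoreF (t : String) (c : Int) : Int :=
  (if t ≠ "done" then -2 else 0) + (if t = "a" ∧ c < 5 then 10 else 0)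

/-- rewards list, structurally, carrying the running 'a' count -/
def rewR : List String → Int → List Int
  | [], _ => []
  | t :: ts, c => scoreF t c :: rewR ts (if t = "a" then c + 1 else c)

def sumI (rs : List Int) : Int := rs.foldl (· + ·) 0

/-- suffix sums, structurally -/
def sufG : List Int → List Int
  | [] => []
  | r :: rs => (r + sumI rs) :: sufG rs

theorem foldl_add_shift (l : List Int) (s : Int) :
    l.foldl (· + ·) s = s + sumI l := by
  induction l generalizing s with
  | nil => simp [sumI]
  | cons r rs ih => simp only [List.foldl_cons, sumI]; rw [ih, ih (0 + r)]; ring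

theorem sumI_cons (r : Int) (rs : List Int) : sumI (r :: rs) = r + sumI rs := by
  calc sumI (r :: rs) = rs.foldl (· + ·) (0 + r) := rfl
    _ = (0 + r) + sumI rs := foldl_add_shift rs (0 + r)
    _ = r + sumI rs := by ring

theorem sumI_eq_sum (l : List Int) : sumI l = l.sum := by
  induction l with
  | nil => simp [sumI]
  | cons r rs ih => rw [sumI_cons, ih, List.sum_cons]

theorem count_shift (l : List String) (c : Int) :
    l.foldl (fun cnt item => if item = "a" then cnt + 1 else cnt) c = c + count_prev_as l := by
  induction l generalizing c with
  | nil => simp [count_prev_as]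
  | cons t ts ih =>
    simp only [List.foldl_cons, count_prev_as]
    rw [ih, ih (if t = "a" then 0 + 1 else 0)]
    split_ifs <;> ring

theorem count_cons (t : String) (ts : List String) :
    count_prev_as (t :: ts) = (if t = "a" then 1 else 0) + count_prev_as ts := by
  calc count_prev_as (t :: ts)
      = ts.foldl (fun cnt item => if item = "a" then cnt + 1 else cnt)
          (if t = "a" then (0 : Int) + 1 else 0) := rfl
    _ = _ := by rw [count_shift]; split_ifs <;> ring

theorem foldl_append_map {α : Type} (f : α → Int) (l : List α) (acc : List Int) :
    l.foldl (fun a i => a ++ [f i]) acc = acc ++ l.map f := by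
  induction l generalizing acc with
  | nil => simp
  | cons x xs ih => simp [ih]

/-- A's score expression equals scoreF. -/
theorem scoreA_eq (t : String) (c : Int) :
    (if t = "a" then
        (if c < 5 then (if t ≠ "done" then (0 : Int) + (-2) else 0) + 10
         else (if t ≠ "done" then (0 : Int) + (-2) else 0))
      else (if t ≠ "done" then (0 : Int) + (-2) else 0)) = scoreF t c := by
  simp only [scoreF]; split_ifs <;> simp_all

/-- A's rewards map equals the structural rewards. -/
theorem mapA_eq_rewR (ts : List String) (c : Int) :
    (List.range ts.length).map (fun i => scoreF (ts.getD i "") (c + count_prev_as (ts.take i)))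
      = rewR ts c := by
  induction ts generalizing c with
  | nil => simp [rewR]
  | cons t ts ih =>
    rw [List.length_cons, List.range_succ_eq_map, List.map_cons, List.map_map]
    have h1 : (fun i => scoreF ((t :: ts).getD i "") (c + count_prev_as ((t :: ts).take i))) ∘ Nat.succ
        = fun i => scoreF (ts.getD i "") ((if t = "a" then c + 1 else c) + count_prev_as (ts.take i)) := by
      funext i
      simp only [Function.comp, List.getD_cons_succ, List.take_succ_cons, count_cons]
      congr 1
      split_ifs <;> ring
    have h0 : scoreF ((t :: ts).getD 0 "") (c + count_prev_as ((t :: ts).take 0)) = scoreF t c := by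
      simp [count_prev_as]
    rw [h1, ih, h0, rewR]

/-- B's forward fold computes the structural rewards and the total 'a' count. -/
theorem foldB_eq (ts : List String) (acc : List Int) (c : Int) :
    ts.foldl (fun (p : List Int × Int) t =>
        (p.1 ++ [(if t ≠ "done" then -2 else 0) + (if t = "a" ∧ p.2 < 5 then 10 else 0)],
         if t = "a" then p.2 + 1 else p.2)) (acc, c)
      = (acc ++ rewR ts c, c + count_prev_as ts) := by
  induction ts generalizing acc c with
  | nil => simp [count_prev_as, rewR]
  | cons t ts ih =>
    simp only [List.foldl_cons]
    rw [ih]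
    refine Prod.ext ?_ ?_
    · simp only [rewR, scoreF, List.append_assoc, List.singleton_append]
    · simp only [count_cons]; split_ifs <;> ring

/-- A's suffix-sum map equals the structural suffix sums. -/
theorem mapSuf_eq_sufG (rs : List Int) :
    (List.range rs.length).map (fun i => (rs.drop i).foldl (· + ·) 0) = sufG rs := by
  induction rs with
  | nil => simp [sufG]
  | cons r l ih =>
    rw [List.length_cons, List.range_succ_eq_map, List.map_cons, List.map_map]
    have h1 : (fun i => ((r :: l).drop i).foldl (· + ·) 0) ∘ Nat.succ
        = fun i => (l.drop i).foldl (· + ·) 0 := by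
      funext i; simp [Function.comp]
    have h0 : ((r :: l).drop 0).foldl (· + ·) 0 = r + sumI l := by
      rw [List.drop_zero]; exact sumI_cons r l
    rw [h1, ih, h0, sufG]

/-- partial sums of B's backward pass -/
def scanH : List Int → Int → List Int
  | [], _ => []
  | r :: rs, a => (a + r) :: scanH rs (a + r)

theorem foldC_eq (rs : List Int) (a : Int) (acc : List Int) :
    rs.foldl (fun (q : Int × List Int) r => (q.1 + r, q.2 ++ [q.1 + r])) (a, acc)
      = (a + sumI rs, acc ++ scanH rs a) := by
  induction rs generalizing a acc with
  | nil => simp [sumI, scanH]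
  | cons r l ih =>
    simp only [List.foldl_cons, scanH]
    rw [ih, sumI_cons]
    refine Prod.ext ?_ ?_
    · simp; ring
    · simp

theorem scanH_append (l l' : List Int) (a : Int) :
    scanH (l ++ l') a = scanH l a ++ scanH l' (a + sumI l) := by
  induction l generalizing a with
  | nil => simp [scanH, sumI]
  | cons r rs ih => simp only [List.cons_append, scanH, ih, sumI_cons]; rw [show a + (r + sumI rs) = a + r + sumI rs by ring]

theorem sumI_reverse (l : List Int) : sumI l.reverse = sumI l := by
  rw [sumI_eq_sum, sumI_eq_sum, List.sum_reverse]

theorem scanH_reverse_eq_sufG (rs : List Int) :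
    (scanH rs.reverse 0).reverse = sufG rs := by
  induction rs with
  | nil => simp [scanH, sufG]
  | cons r l ih =>
    simp only [List.reverse_cons, scanH_append, scanH, sufG]
    rw [List.reverse_append]
    simp only [List.reverse_cons, List.reverse_nil, List.nil_append, List.cons_append,
      List.nil_append, ih, sumI_reverse]
    rw [show (0 : Int) + sumI l + r = r + sumI l by ring]

-- ===== VERDICT (by name: the statement is the Claim_ definition above) =====
theorem get_rtgs_spec : Claim_equal_get_rtgs := by
  intro traj _
  unfold Spec_get_rtgs get_rtgs get_rtgs_alt
  have hA1 : (List.range traj.length).foldl (fun rewards i =>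
      let t := traj.getD i ""
      let score : Int := 0
      let score := if t ≠ "done" then score + (-2) else score
      let score := if t = "a" then
          (if count_prev_as (traj.take i) < 5 then score + 10 else score)
        else score
      rewards ++ [score]) [] = rewR traj 0 := by
    rw [show (fun (rewards : List Int) (i : Nat) =>
        let t := traj.getD i ""
        let score : Int := 0
        let score := if t ≠ "done" then score + (-2) else score
        let score := if t = "a" then
            (if count_prev_as (traj.take i) < 5 then score + 10 else score)
          else score
        rewards ++ [score])
      = fun rewards i => rewards ++ [scoreF (traj.getD i "") (0 + count_prev_as (traj.take i))] from ?_]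
    · rw [foldl_append_map, List.nil_append, mapA_eq_rewR]
    · funext rewards i
      simp only []
      rw [← scoreA_eq (traj.getD i "") (0 + count_prev_as (traj.take i))]
      norm_num
  rw [hA1]
  simp only [foldB_eq, foldC_eq, List.nil_append, foldl_append_map, mapSuf_eq_sufG,
    scanH_reverse_eq_sufG]
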